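-- pv_equiv track=rewrite | github.com/aldrinc/ghc | mos/backend/app/temporal/activities/campaign_intent_activities.py | _find_disallowed_phrase
-- ===== SOURCE A (Python) =====
-- def _find_disallowed_phrase(text: str | None, disallowed_phrases: tuple[str, ...]) -> str | None:
--     if not isinstance(text, str):
--         return None
--     normalized = text.strip().lower()
--     if not normalized:
--         return None
--     for phrase in disallowed_phrases:
--         if phrase in normalized:
--             return phrase
--     return None
-- ===== SOURCE B (Python) =====
-- def _find_disallowed_phrase(text, disallowed_phrases):
--     if not isinstance(text, str):
--         return None
--     normalized = text.strip().lower()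
--     if not normalized:
--         return None
--     if not disallowed_phrases:
--         return None
--     m = max(len(p) for p in disallowed_phrases)
--     subs = {normalized[i:i + k] for i in range(len(normalized)) for k in range(m + 1)}
--     for phrase in disallowed_phrases:
--         if phrase in subs:
--             return phrase
--     return None
-- ===== Notes on version B (the rewrite author's own statement) =====
-- stated objective: alternative
-- what changed: B builds a hash set of every substring of the normalized text up to the maximum phrase length once, then tests each phrase by a single set lookup, instead of scanning the whole text with 'in' once per phrase.
import Mathlib
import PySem

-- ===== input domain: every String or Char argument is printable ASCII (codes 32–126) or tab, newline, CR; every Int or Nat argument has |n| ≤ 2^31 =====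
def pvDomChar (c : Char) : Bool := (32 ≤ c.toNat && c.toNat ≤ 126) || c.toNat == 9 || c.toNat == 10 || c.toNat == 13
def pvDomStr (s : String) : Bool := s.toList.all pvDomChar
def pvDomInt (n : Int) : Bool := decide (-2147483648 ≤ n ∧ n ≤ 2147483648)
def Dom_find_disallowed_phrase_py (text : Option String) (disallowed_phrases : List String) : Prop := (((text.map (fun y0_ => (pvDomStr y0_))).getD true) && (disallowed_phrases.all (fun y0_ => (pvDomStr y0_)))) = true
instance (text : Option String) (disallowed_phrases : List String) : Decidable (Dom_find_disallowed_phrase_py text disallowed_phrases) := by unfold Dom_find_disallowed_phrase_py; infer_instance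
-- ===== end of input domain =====

-- B replaces A's per-phrase substring scan by one precomputed set of all substrings of the
-- normalized text up to the maximum phrase length, then a set lookup per phrase (objective: alternative).


-- ===== PORT A =====
-- the 'for phrase in disallowed_phrases' loop with early return
def pvLoopA (normalized : String) : List String → Option String
  | [] => none
  | p :: rest => if PySem.Str.isIn p normalized then some p else pvLoopA normalized rest

def find_disallowed_phrase_py (text : Option String) (disallowed_phrases : List String) : Option String :=
  match text with
  | none => none
  | some t =>
    let normalized := PySem.Str.lower (PySem.Str.strip t)
    if PySem.Str.len normalized = 0 then none
    else pvLoopA normalized disallowed_phrases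

-- ===== PORT B =====
-- max(len(p) for p in disallowed_phrases), with q the first phrase
def pvMaxLen (q : String) (qs : List String) : Int :=
  qs.foldl (fun acc p => max acc (PySem.Str.len p)) (PySem.Str.len q)

-- {normalized[i:i+k] for i in range(len(normalized)) for k in range(m+1)}
def pvSubs (normalized : String) (m : Int) : PySem.Set String :=
  PySem.Set.ofList ((PySem.List.pyRange 0 (PySem.Str.len normalized) 1).flatMap
    (fun i => (PySem.List.pyRange 0 (m + 1) 1).map
      (fun k => PySem.Str.slice normalized (some i) (some (i + k)))))

-- the 'for phrase in disallowed_phrases' loop of B: set lookup per phrase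
def pvLoopB (subs : PySem.Set String) : List String → Option String
  | [] => none
  | p :: rest => if PySem.Set.contains subs p then some p else pvLoopB subs rest

def find_disallowed_phrase_py_alt (text : Option String) (disallowed_phrases : List String) : Option String :=
  match text with
  | none => none
  | some t =>
    let normalized := PySem.Str.lower (PySem.Str.strip t)
    if PySem.Str.len normalized = 0 then none
    else match disallowed_phrases with
      | [] => none
      | q :: qs => pvLoopB (pvSubs normalized (pvMaxLen q qs)) (q :: qs)

-- ===== PRECONDITION & SPEC =====
def Spec_find_disallowed_phrase_py (text : Option String) (disallowed_phrases : List String) (out : Option String) : Prop := out = find_disallowed_phrase_py_alt text disallowed_phrases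
instance (text : Option String) (disallowed_phrases : List String) (out : Option String) : Decidable (Spec_find_disallowed_phrase_py text disallowed_phrases out) := by unfold Spec_find_disallowed_phrase_py; infer_instance

-- ===== CLAIM (what is proved, stated in full; the proofs are below) =====
def Claim_equal_find_disallowed_phrase_py : Prop := ∀ (text : Option String) (disallowed_phrases : List String), Dom_find_disallowed_phrase_py text disallowed_phrases → Spec_find_disallowed_phrase_py text disallowed_phrases (find_disallowed_phrase_py text disallowed_phrases)

-- ===== LEMMAS AND PROOFS =====

-- For a phrase no longer than m, membership in the substring set is exactly Python's 'phrase in normalized'.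
theorem pv_contains_subs (normalized : String) (m : Int) (h0 : normalized.toList ≠ [])
    (p : String) (hp : (p.toList.length : Int) ≤ m) :
    PySem.Set.contains (pvSubs normalized m) p = PySem.Str.isIn p normalized := by
  have key : p ∈ (PySem.List.pyRange 0 (PySem.Str.len normalized) 1).flatMap
      (fun i => (PySem.List.pyRange 0 (m + 1) 1).map
        (fun k => PySem.Str.slice normalized (some i) (some (i + k)))) ↔
      p.toList <:+: normalized.toList := by
    constructor
    · rintro h
      rw [List.mem_flatMap] at h
      obtain ⟨i, hi, h⟩ := h
      rw [List.mem_map] at h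
      obtain ⟨k, hk, rfl⟩ := h
      rw [PySem.List.mem_pyRange_one] at hi hk
      obtain ⟨i, rfl⟩ : ∃ j : Nat, (j : Int) = i := ⟨i.toNat, Int.toNat_of_nonneg hi.1⟩
      obtain ⟨k, rfl⟩ : ∃ j : Nat, (j : Int) = k := ⟨k.toNat, Int.toNat_of_nonneg hk.1⟩
      have heq : (PySem.Str.slice normalized (some (i : Int)) (some ((i : Int) + (k : Int)))).toList
          = (normalized.toList.drop i).take k := by
        simp [PySem.List.slice_natCast_add]
      rw [heq]
      exact ((normalized.toList.drop i).take_prefix k).isInfix.trans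
        (normalized.toList.drop_suffix i).isInfix
    · rintro ⟨s, t, hst⟩
      have hpos : 0 < normalized.toList.length := List.length_pos_iff.mpr h0
      by_cases hpz : p.toList = []
      · rw [List.mem_flatMap]
        refine ⟨0, ?_, ?_⟩
        · rw [PySem.List.mem_pyRange_one, PySem.Str.len_eq]
          constructor <;> omega
        · rw [List.mem_map]
          refine ⟨0, ?_, ?_⟩
          · rw [PySem.List.mem_pyRange_one]
            constructor <;> omega
          · apply String.toList_inj.mp
            simp [hpz, PySem.List.slice, PySem.List.clampIdx]
      have hp1 : 1 ≤ p.toList.length := List.length_pos_iff.mpr hpz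
      have hlen := congrArg List.length hst
      rw [List.length_append, List.length_append] at hlen
      rw [List.mem_flatMap]
      refine ⟨(s.length : Int), ?_, ?_⟩
      · rw [PySem.List.mem_pyRange_one]
        refine ⟨Int.natCast_nonneg _, ?_⟩
        rw [PySem.Str.len_eq]
        omega
      · rw [List.mem_map]
        refine ⟨(p.toList.length : Int), ?_, ?_⟩
        · rw [PySem.List.mem_pyRange_one]
          exact ⟨Int.natCast_nonneg _, by omega⟩
        · apply String.toList_inj.mp
          have heq : (PySem.Str.slice normalized (some (s.length : Int))
              (some ((s.length : Int) + (p.toList.length : Int)))).toList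
              = (normalized.toList.drop s.length).take p.toList.length := by
            simp [PySem.List.slice_natCast_add]
          rw [heq, ← hst, List.append_assoc, List.drop_left, List.take_left]
  rw [Bool.eq_iff_iff, PySem.Set.contains_iff, PySem.Str.isIn_iff_infix]
  unfold pvSubs
  rw [PySem.Set.mem_ofList]
  exact key

theorem pv_loop_eq (normalized : String) (subs : PySem.Set String) (l : List String)
    (h : ∀ p ∈ l, PySem.Set.contains subs p = PySem.Str.isIn p normalized) :
    pvLoopB subs l = pvLoopA normalized l := by
  induction l with
  | nil => rfl
  | cons p rest ih =>
    simp only [pvLoopA, pvLoopB]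
    rw [h p (List.mem_cons_self)]
    split
    · rfl
    · exact ih (fun q hq => h q (List.mem_cons_of_mem _ hq))

-- ===== VERDICT (by name: the statement is the Claim_ definition above) =====
theorem find_disallowed_phrase_py_spec : Claim_equal_find_disallowed_phrase_py := by
  intro text disallowed_phrases _
  unfold Spec_find_disallowed_phrase_py find_disallowed_phrase_py find_disallowed_phrase_py_alt
  cases text with
  | none => rfl
  | some t =>
    simp only
    split
    · rfl
    · rename_i hlen
      have h0 : (PySem.Str.lower (PySem.Str.strip t)).toList ≠ [] := by
        intro hnil
        apply hlen
        rw [PySem.Str.len_eq, hnil]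
        rfl
      cases disallowed_phrases with
      | nil => rfl
      | cons q qs =>
        refine (pv_loop_eq _ _ _ ?_).symm
        intro p hp
        apply pv_contains_subs _ _ h0
        rw [← PySem.Str.len_eq]
        rw [List.mem_cons] at hp
        rcases hp with rfl | hp
        · exact (PySem.List.le_foldl_max_int qs PySem.Str.len (PySem.Str.len p)).1
        · exact (PySem.List.le_foldl_max_int qs PySem.Str.len (PySem.Str.len q)).2 p hp
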